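-- pv_equiv track=rewrite | github.com/leidZhang/qenv | qenv/quanser/hal/utilities/image_processing.py | extract_point_given_row
-- ===== SOURCE A (Python) =====
-- def extract_point_given_row(row):
--     counter = len(row)
--     solution = -1
--     for i in range(len(row)):
--         if row[counter - 1 - i] > 0:
--             solution = counter - 1 - i
--             break
--
--     return solution
-- ===== SOURCE B (Python) =====
-- def extract_point_given_row(row):
--     return max((i for i, v in enumerate(row) if v > 0), default=-1)
-- ===== Notes on version B (the rewrite author's own statement) =====
-- stated objective: idiomatic
-- what changed: Replaces A's reverse index-arithmetic scan with an early break by a one-line filter-then-reduce: max over the forward-enumerated positive indices with default -1.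
import Mathlib
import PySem

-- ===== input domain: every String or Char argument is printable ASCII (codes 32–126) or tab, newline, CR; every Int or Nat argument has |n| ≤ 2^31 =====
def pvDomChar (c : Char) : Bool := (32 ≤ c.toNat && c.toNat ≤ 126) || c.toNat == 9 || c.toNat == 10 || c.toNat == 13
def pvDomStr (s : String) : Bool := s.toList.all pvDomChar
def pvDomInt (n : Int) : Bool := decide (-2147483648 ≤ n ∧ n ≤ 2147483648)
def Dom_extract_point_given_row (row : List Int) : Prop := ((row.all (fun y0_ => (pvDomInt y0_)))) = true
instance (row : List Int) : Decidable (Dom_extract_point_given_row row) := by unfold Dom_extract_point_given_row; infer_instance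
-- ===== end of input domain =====

-- B: one-line filter-then-reduce (max over positive indices, default -1) instead of A's reverse scan with break; same O(n), idiomatic.
-- ===== PORT A =====
-- the for-loop with break: recursion over the remaining index list, returning on the first positive hit
def pvALoop (row : List Int) (counter : Int) : List Int → Int
  | [] => -1
  | i :: rest =>
      if PySem.List.pyGetD row (counter - 1 - i) 0 > 0 then counter - 1 - i
      else pvALoop row counter rest

def extract_point_given_row (row : List Int) : Int :=
  let counter : Int := PySem.List.len row
  pvALoop row counter (PySem.List.pyRange 0 (PySem.List.len row) 1)

-- ===== PORT B =====
def extract_point_given_row_alt (row : List Int) : Int :=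
  (PySem.List.max?
      (((PySem.List.enumerate row 0).filter (fun p => decide (p.2 > 0))).map (fun p => p.1))
      (fun y => y)).getD (-1)

-- ===== PRECONDITION & SPEC =====
def Spec_extract_point_given_row (row : List Int) (out : Int) : Prop := out = extract_point_given_row_alt row
instance (row : List Int) (out : Int) : Decidable (Spec_extract_point_given_row row out) := by unfold Spec_extract_point_given_row; infer_instance

-- ===== CLAIM (what is proved, stated in full; the proofs are below) =====
def Claim_equal_extract_point_given_row : Prop := ∀ (row : List Int), Dom_extract_point_given_row row → Spec_extract_point_given_row row (extract_point_given_row row)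

-- ===== LEMMAS AND PROOFS =====



-- a right-to-left find over the first k positions: the value A's loop computes
def pvRevFind (row : List Int) : Nat → Int
  | 0 => -1
  | k+1 => if PySem.List.pyGetD row (k : Int) 0 > 0 then (k : Int) else pvRevFind row k

lemma pvALoop_eq_revFind (row : List Int) :
    ∀ k : Nat, k ≤ row.length →
      pvALoop row (row.length : Int) (PySem.List.pyRange ((row.length : Int) - k) (row.length : Int) 1)
        = pvRevFind row k := by
  intro k
  induction k with
  | zero =>
    intro _
    rw [PySem.List.pyRange_one_eq_nil (by omega)]
    rfl
  | succ k ih =>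
    intro hk
    rw [PySem.List.pyRange_one_cons (by omega)]
    simp only [pvALoop, pvRevFind]
    have h1 : (row.length : Int) - 1 - ((row.length : Int) - (k+1 : Nat)) = (k : Int) := by
      push_cast; ring
    have h2 : (row.length : Int) - (k+1 : Nat) + 1 = (row.length : Int) - (k : Nat) := by
      push_cast; ring
    rw [h1, h2, ih (by omega)]

lemma extract_eq_revFind (row : List Int) :
    extract_point_given_row row = pvRevFind row row.length := by
  have := pvALoop_eq_revFind row row.length le_rfl
  simpa [extract_point_given_row] using this

-- the filtered-index list of B
def pvF (row : List Int) : List Int :=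
  ((PySem.List.enumerate row 0).filter (fun p => decide (p.2 > 0))).map (fun p => p.1)

lemma pvF_mem_lt (row : List Int) : ∀ j ∈ pvF row, j < (row.length : Int) := by
  intro j hj
  simp only [pvF, List.mem_map, List.mem_filter] at hj
  obtain ⟨p, ⟨hp, _⟩, rfl⟩ := hj
  rw [PySem.List.mem_enumerate_iff] at hp
  obtain ⟨m, hm, rfl⟩ := hp
  simp; omega

lemma foldl_max_le_of (t : List Int) : ∀ (a j : Int), a ≤ j → (∀ y ∈ t, y ≤ j) → t.foldl max a ≤ j := by
  induction t with
  | nil => intro a j h _; simpa using h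
  | cons x t ih =>
    intro a j h hall
    simp only [List.foldl_cons]
    exact ih _ _ (max_le h (hall x (List.mem_cons_self ..))) (fun y hy => hall y (List.mem_cons_of_mem _ hy))

lemma max_append_singleton (L : List Int) (j : Int) (h : ∀ y ∈ L, y ≤ j) :
    (PySem.List.max? (L ++ [j]) (fun y => y)).getD (-1) = j := by
  cases L with
  | nil => simp [PySem.List.max?]
  | cons x t =>
    rw [List.cons_append, PySem.List.max?_id_cons]
    simp only [Option.getD_some, List.foldl_append, List.foldl_cons, List.foldl_nil]
    have hx : x ≤ j := h x (List.mem_cons_self ..)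
    have ht : t.foldl max x ≤ j :=
      foldl_max_le_of t x j hx (fun y hy => h y (List.mem_cons_of_mem _ hy))
    omega

lemma pvF_append (xs : List Int) (x : Int) :
    pvF (xs ++ [x]) = pvF xs ++ (if x > 0 then [(xs.length : Int)] else []) := by
  simp only [pvF, PySem.List.enumerate_append]
  rw [List.filter_append, List.map_append]
  congr 1
  by_cases hx : x > 0 <;> simp [PySem.List.enumerate, hx]

lemma pvRevFind_append (xs : List Int) (x : Int) :
    ∀ k : Nat, k ≤ xs.length → pvRevFind (xs ++ [x]) k = pvRevFind xs k := by
  intro k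
  induction k with
  | zero => intro _; rfl
  | succ k ih =>
    intro hk
    have hg : PySem.List.pyGetD (xs ++ [x]) (k : Int) 0 = PySem.List.pyGetD xs (k : Int) 0 := by
      rw [PySem.List.pyGetD_natCast, PySem.List.pyGetD_natCast]
      rw [List.getD_append _ _ _ _ (by omega)]
    simp only [pvRevFind, hg, ih (by omega)]

lemma alt_eq_revFind (row : List Int) :
    extract_point_given_row_alt row = pvRevFind row row.length := by
  have key : ∀ row : List Int, (PySem.List.max? (pvF row) (fun y => y)).getD (-1) = pvRevFind row row.length := by
    intro row
    induction row using List.reverseRecOn with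
    | nil => simp [pvF, PySem.List.enumerate, PySem.List.max?, pvRevFind]
    | append_singleton xs x ih =>
      rw [pvF_append]
      by_cases hx : x > 0
      · simp only [hx, if_true]
        rw [max_append_singleton _ _ (fun y hy => le_of_lt (pvF_mem_lt xs y hy))]
        have : (xs ++ [x]).length = xs.length + 1 := by simp
        rw [this]
        simp only [pvRevFind]
        have hg : PySem.List.pyGetD (xs ++ [x]) (xs.length : Int) 0 = x := by
          rw [PySem.List.pyGetD_natCast]
          simp
        rw [hg, if_pos hx]
      · simp only [hx, if_false, List.append_nil, ih]
        have : (xs ++ [x]).length = xs.length + 1 := by simp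
        rw [this]
        simp only [pvRevFind]
        have hg : PySem.List.pyGetD (xs ++ [x]) (xs.length : Int) 0 = x := by
          rw [PySem.List.pyGetD_natCast]
          simp
        rw [hg, if_neg hx, pvRevFind_append xs x xs.length le_rfl]
  exact key row

-- ===== VERDICT =====
theorem extract_point_given_row_spec : Claim_equal_extract_point_given_row := by
  intro row _
  unfold Spec_extract_point_given_row
  rw [extract_eq_revFind, alt_eq_revFind]
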